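-- pv_equiv track=rewrite | github.com/linpeiyu164/CommLab_Final | encryption.py | bin_to_int_key
-- ===== SOURCE A (Python) =====
-- def bin_to_int_key(bin_key):
--     # transform binary key shared by alice and trent into KAT(integer based key)
--     n = len(bin_key)
--     int_key = []
--     zero = []
--     one = []
--     for i in range(0,n):
--         if not bin_key[i]:
--             zero.append(i)
--         else:
--             one.append(i)
--     int_key = zero + one
--     return int_key
-- ===== SOURCE B (Python) =====
-- def bin_to_int_key(bin_key):
--     # stable sort: positions with falsy bit (key 0) come first, ties keep ascending index order
--     return sorted(range(len(bin_key)), key=lambda i: bool(bin_key[i]))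
-- ===== Notes on version B (the rewrite author's own statement) =====
-- stated objective: idiomatic
-- what changed: Replaces the explicit two-bucket partition loop with a single stable sort of the index range keyed by the bit's truthiness.
import Mathlib
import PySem

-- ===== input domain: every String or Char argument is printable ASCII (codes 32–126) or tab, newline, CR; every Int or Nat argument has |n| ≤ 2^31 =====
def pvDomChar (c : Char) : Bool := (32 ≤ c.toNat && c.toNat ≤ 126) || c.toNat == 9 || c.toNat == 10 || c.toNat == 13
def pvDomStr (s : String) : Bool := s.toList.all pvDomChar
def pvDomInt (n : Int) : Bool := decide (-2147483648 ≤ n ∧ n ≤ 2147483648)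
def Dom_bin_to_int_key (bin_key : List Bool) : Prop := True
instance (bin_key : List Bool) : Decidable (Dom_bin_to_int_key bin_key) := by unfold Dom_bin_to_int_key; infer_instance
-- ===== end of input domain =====

-- B replaces A's explicit two-bucket partition loop with one stable sort of the index range
-- keyed by the bit (idiomatic; same result by sort stability).

-- ===== PORT A =====
def bin_to_int_key (bin_key : List Bool) : List Int :=
  let n : Int := bin_key.length
  -- the loop keeps the pair (zero, one); indices 0 ≤ i < n are always in range, so pyGetD's
  -- default is never used
  let st := (PySem.List.pyRange 0 n 1).foldl
    (fun (st : List Int × List Int) i =>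
      if !(PySem.List.pyGetD bin_key i false) then (st.1 ++ [i], st.2) else (st.1, st.2 ++ [i]))
    ([], [])
  st.1 ++ st.2

-- ===== PORT B =====
-- bool(bin_key[i]) used as a sort key: Python bools compare as the integers 0/1
def bin_to_int_key_alt (bin_key : List Bool) : List Int :=
  PySem.List.sorted (PySem.List.pyRange 0 (bin_key.length : Int) 1)
    (fun i => if PySem.List.pyGetD bin_key i false then (1 : Int) else 0) false

-- ===== PRECONDITION & SPEC =====
def Spec_bin_to_int_key (bin_key : List Bool) (out : List Int) : Prop := out = bin_to_int_key_alt bin_key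
instance (bin_key : List Bool) (out : List Int) : Decidable (Spec_bin_to_int_key bin_key out) := by unfold Spec_bin_to_int_key; infer_instance

-- ===== CLAIM (what is proved, stated in full; the proofs are below) =====
def Claim_equal_bin_to_int_key : Prop := ∀ (bin_key : List Bool), Dom_bin_to_int_key bin_key → Spec_bin_to_int_key bin_key (bin_to_int_key bin_key)

-- ===== LEMMAS AND PROOFS =====

-- A's loop accumulates the two filters of the traversed range
theorem pvFoldl_partition (bin_key : List Bool) (xs : List Int) :
    ∀ (a b : List Int),
      xs.foldl (fun (st : List Int × List Int) i =>
        if !(PySem.List.pyGetD bin_key i false) then (st.1 ++ [i], st.2) else (st.1, st.2 ++ [i]))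
        (a, b)
      = (a ++ xs.filter (fun i => !(PySem.List.pyGetD bin_key i false)),
         b ++ xs.filter (fun i => PySem.List.pyGetD bin_key i false)) := by
  induction xs with
  | nil => intro a b; simp
  | cons x xs ih =>
    intro a b
    simp only [List.foldl_cons]
    by_cases h : PySem.List.pyGetD bin_key x false
    · rw [if_neg (by simp [h])]
      rw [ih]
      simp [h]
    · rw [if_pos (by simp [h])]
      rw [ih]
      simp [h]

-- one step of insertBy (definitional)
theorem pvInsertBy_cons {α : Type} (before : α → α → Bool) (x y : α) (ys : List α) :
    PySem.List.insertBy before x (y :: ys)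
      = if before x y then x :: y :: ys else y :: PySem.List.insertBy before x ys := rfl

-- sorted(xs ++ [x]) inserts x into sorted(xs)  (insertion-sort characterisation)
theorem pvSorted_append_singleton {α κ : Type} [LT κ] [DecidableLT κ]
    (xs : List α) (x : α) (key : α → κ) :
    PySem.List.sorted (xs ++ [x]) key
      = PySem.List.insertBy (fun a b => decide (key a < key b)) x (PySem.List.sorted xs key) := by
  rw [PySem.List.sorted_eq_foldl_insertBy, PySem.List.sorted_eq_foldl_insertBy, List.foldl_append]
  rfl

theorem pvInsertBy_append_of_forall_not_before {α : Type} (before : α → α → Bool) (x : α)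
    (zs os : List α) (hz : ∀ z ∈ zs, before x z = false) :
    PySem.List.insertBy before x (zs ++ os) = zs ++ PySem.List.insertBy before x os := by
  induction zs with
  | nil => rfl
  | cons z zs ih =>
    rw [List.cons_append, pvInsertBy_cons, if_neg (by simp [hz z (by simp)]),
      ih (fun z hzm => hz z (by simp [hzm])), List.cons_append]

theorem pvInsertBy_of_head_before {α : Type} (before : α → α → Bool) (x : α) (os : List α)
    (ho : ∀ o ∈ os.head?, before x o = true) :
    PySem.List.insertBy before x os = x :: os := by
  cases os with
  | nil => rfl
  | cons o t => rw [pvInsertBy_cons, if_pos (ho o (by simp))]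

-- stable sort of a 0/1-keyed list is the partition
theorem pvSorted_partition (bin_key : List Bool) (n : Nat) :
    PySem.List.sorted (PySem.List.pyRange 0 (n : Int) 1)
      (fun i => if PySem.List.pyGetD bin_key i false then (1 : Int) else 0) false
    = (PySem.List.pyRange 0 (n : Int) 1).filter (fun i => !(PySem.List.pyGetD bin_key i false))
      ++ (PySem.List.pyRange 0 (n : Int) 1).filter (fun i => PySem.List.pyGetD bin_key i false) := by
  induction n with
  | zero => simp [PySem.List.sorted]
  | succ n ih =>
    have hstep : ((n : Int) + 1) = ((n + 1 : Nat) : Int) := by push_cast; ring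
    rw [← hstep, PySem.List.pyRange_one_succ_right (by positivity)]
    rw [pvSorted_append_singleton, ih]
    by_cases h : PySem.List.pyGetD bin_key (n : Int) false
    · rw [PySem.List.insertBy_of_forall_not_before]
      · simp [List.filter_append, h]
      · intro y hy
        by_cases hyk : PySem.List.pyGetD bin_key y false <;> simp [h, hyk]
    · rw [pvInsertBy_append_of_forall_not_before, pvInsertBy_of_head_before]
      · simp [List.filter_append, h]
      · intro o ho
        have hpred := (List.mem_filter.mp (List.mem_of_mem_head? ho)).2
        simp [h, hpred]
      · intro z hz
        have := (List.mem_filter.mp hz).2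
        simp at this
        simp [h, this]

theorem bin_to_int_key_spec : Claim_equal_bin_to_int_key := by
  intro bin_key _
  unfold Spec_bin_to_int_key bin_to_int_key bin_to_int_key_alt
  dsimp only
  rw [pvFoldl_partition, pvSorted_partition]
  simp
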